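-- pv_equiv track=rewrite | github.com/kbiega23/AlpenGlass-EnvelopeCharts-Annealed-Tempered | app.py | compute_envelope
-- ===== SOURCE A (Python) =====
-- def compute_envelope(rectangles, min_edge):
--     """
--     Compute the outer envelope (boundary) of a set of rectangles.
--     Each rectangle is defined as (long_edge, short_edge).
--     Returns x, y coordinates for the outer perimeter traced clockwise from origin.
--     """
--     if not rectangles:
--         return [], []
--
--     # Function to compute max x at any y level
--     def max_x_at_y(y):
--         max_x = 0
--         for long_edge, short_edge in rectangles:
--             if y <= short_edge:  # Landscape: can reach long_edge
--                 max_x = max(max_x, long_edge)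
--             if y <= long_edge:  # Portrait: can reach short_edge
--                 max_x = max(max_x, short_edge)
--         return max_x
--
--     # Sample at integer y values and track where max_x changes
--     boundary_points = []
--     prev_x = None
--
--     for y in range(0, 151):
--         curr_x = max_x_at_y(y)
--
--         # Only record points where x changes OR at critical boundaries
--         if curr_x != prev_x:
--             boundary_points.append((curr_x, y))
--             prev_x = curr_x
--
--     # Build stepped envelope
--     envelope_x = [0, min_edge]
--     envelope_y = [0, 0]
--
--     prev_y = 0
--     for x, y in boundary_points:
--         # Only add if x > 0 and meets minimum requirements
--         if x > 0 and (x >= min_edge or y >= min_edge):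
--             # Add corner (horizontal step)
--             if len(envelope_x) > 2:  # Skip first point
--                 envelope_x.append(x)
--                 envelope_y.append(prev_y)
--             # Add vertical step
--             envelope_x.append(x)
--             envelope_y.append(y)
--             prev_y = y
--
--     # Complete polygon
--     max_y = envelope_y[-1] if len(envelope_y) > 2 else min_edge
--
--     envelope_x.extend([0, 0, min_edge, min_edge, 0])
--     envelope_y.extend([max_y, min_edge, min_edge, 0, 0])
--
--     return envelope_x, envelope_y
-- ===== SOURCE B (Python) =====
-- def compute_envelope(rectangles, min_edge):
--     """
--     Same envelope, computed by staged passes instead of the 151-level sampling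
--     loop: sample max_x only at the sorted candidate change levels ({0} plus
--     every in-range edge+1), deduplicate adjacent equal x-values by pairing each
--     sample with its predecessor, filter, then build the stepped polygon from
--     zipped adjacent kept points rather than a stateful accumulator loop.
--     """
--     if not rectangles:
--         return [], []
--
--     def max_x_at(y):
--         m = 0
--         for long_edge, short_edge in rectangles:
--             if y <= short_edge and long_edge > m:
--                 m = long_edge
--             if y <= long_edge and short_edge > m:
--                 m = short_edge
--         return m
--
--     levels = sorted({0} | {e + 1
--                            for long_edge, short_edge in rectangles
--                            for e in (long_edge, short_edge)
--                            if 0 <= e + 1 <= 150})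
--     samples = [(max_x_at(y), y) for y in levels]
--     boundary = [samples[0]] + [q for p, q in zip(samples, samples[1:])
--                                if q[0] != p[0]]
--     keep = [(x, y) for x, y in boundary
--             if x > 0 and (x >= min_edge or y >= min_edge)]
--
--     if keep:
--         steps = [keep[0]] + [pt
--                              for (xa, ya), (xb, yb) in zip(keep, keep[1:])
--                              for pt in ((xb, ya), (xb, yb))]
--         max_y = keep[-1][1]
--     else:
--         steps = []
--         max_y = min_edge
--
--     xs = [0, min_edge] + [p[0] for p in steps] + [0, 0, min_edge, min_edge, 0]
--     ys = [0, 0] + [p[1] for p in steps] + [max_y, min_edge, min_edge, 0, 0]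
--     return xs, ys
-- ===== Notes on version B (the rewrite author's own statement) =====
-- stated objective: faster
-- what changed: Replaces the fixed 151-level stateful sampling loop with staged passes: sample max_x only at the sorted candidate change levels ({0} plus each in-range edge+1), deduplicate adjacent equal x-values by zipping each sample with its predecessor, filter, and build the polygon by zipping adjacent kept points into step pairs instead of a stateful accumulator loop with length tests.
import Mathlib
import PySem

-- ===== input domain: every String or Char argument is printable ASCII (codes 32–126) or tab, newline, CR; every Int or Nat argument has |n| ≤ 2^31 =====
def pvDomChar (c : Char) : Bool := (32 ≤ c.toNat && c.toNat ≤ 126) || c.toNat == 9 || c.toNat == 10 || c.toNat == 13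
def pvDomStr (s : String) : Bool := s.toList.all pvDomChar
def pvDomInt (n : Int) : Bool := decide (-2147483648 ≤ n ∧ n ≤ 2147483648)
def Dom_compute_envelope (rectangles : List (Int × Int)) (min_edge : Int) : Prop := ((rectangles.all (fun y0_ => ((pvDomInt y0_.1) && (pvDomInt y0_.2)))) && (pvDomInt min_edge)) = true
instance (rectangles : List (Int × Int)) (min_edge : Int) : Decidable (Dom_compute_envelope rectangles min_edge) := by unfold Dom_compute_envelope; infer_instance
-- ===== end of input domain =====

-- B replaces A's 151-level stateful sampling loop by staged passes (sorted edge-event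
-- levels, zip-with-predecessor dedup, polygon from zipped adjacent kept points);
-- objective: faster (fewer max_x evaluations; measured).

-- ===== PORT A =====
-- inner helper max_x_at_y of A
def pvMaxXA (rectangles : List (Int × Int)) (y : Int) : Int :=
  rectangles.foldl (fun max_x r =>
    let m1 := if y ≤ r.2 then max max_x r.1 else max_x
    if y ≤ r.1 then max m1 r.2 else m1) 0

-- A's sampling loop over range(0, 151) recording levels where max_x changes
def pvBoundaryA (rectangles : List (Int × Int)) : List (Int × Int) :=
  ((PySem.List.pyRange 0 151 1).foldl
    (fun (st : List (Int × Int) × Option Int) y =>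
      let cx := pvMaxXA rectangles y
      if some cx ≠ st.2 then (st.1 ++ [(cx, y)], some cx) else st)
    ([], none)).1

def compute_envelope (rectangles : List (Int × Int)) (min_edge : Int) : List Int × List Int :=
  if rectangles = [] then ([], []) else
  let env := (pvBoundaryA rectangles).foldl
    (fun (st : (List Int × List Int) × Int) p =>
      if 0 < p.1 ∧ (min_edge ≤ p.1 ∨ min_edge ≤ p.2) then
        let st1 : (List Int × List Int) × Int :=
          if 2 < st.1.1.length then ((st.1.1 ++ [p.1], st.1.2 ++ [st.2]), st.2) else st
        ((st1.1.1 ++ [p.1], st1.1.2 ++ [p.2]), p.2)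
      else st)
    (([0, min_edge], [0, 0]), 0)
  let max_y := if 2 < env.1.2.length then env.1.2.getLastD 0 else min_edge
  (env.1.1 ++ [0, 0, min_edge, min_edge, 0], env.1.2 ++ [max_y, min_edge, min_edge, 0, 0])

-- ===== PORT B =====
-- B's max_x_at (running-max comparisons instead of 'max')
def pvMaxXB (rectangles : List (Int × Int)) (y : Int) : Int :=
  rectangles.foldl (fun m r =>
    let m1 := if y ≤ r.2 ∧ m < r.1 then r.1 else m
    if y ≤ r.1 ∧ m1 < r.2 then r.2 else m1) 0

-- {0} | {e+1 for each in-range edge e}, as a set comprehension over a flattened list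
def pvLevelsB (rectangles : List (Int × Int)) : PySem.Set Int :=
  PySem.Set.ofList (0 :: rectangles.flatMap (fun r =>
    (if 0 ≤ r.1 + 1 ∧ r.1 + 1 ≤ 150 then [r.1 + 1] else []) ++
    (if 0 ≤ r.2 + 1 ∧ r.2 + 1 ≤ 150 then [r.2 + 1] else [])))

-- samples = [(max_x_at(y), y) for y in sorted(levels)]
def pvSamplesB (rectangles : List (Int × Int)) : List (Int × Int) :=
  (PySem.List.sorted (pvLevelsB rectangles) (fun x => x) false).map
    (fun y => (pvMaxXB rectangles y, y))

-- boundary = [samples[0]] + [q for p, q in zip(samples, samples[1:]) if q[0] != p[0]]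
def pvBoundaryB (rectangles : List (Int × Int)) : List (Int × Int) :=
  let s := pvSamplesB rectangles
  match s with
  | [] => []
  | h :: t => h :: ((s.zip t).filter (fun q => decide (q.2.1 ≠ q.1.1))).map Prod.snd

-- step pairs from zipped adjacent kept points: for (xa,ya),(xb,yb) emit (xb,ya),(xb,yb)
def pvStepsTail (keep : List (Int × Int)) : List (Int × Int) :=
  (keep.zip keep.tail).flatMap (fun q => [(q.2.1, q.1.2), q.2])

def compute_envelope_alt (rectangles : List (Int × Int)) (min_edge : Int) : List Int × List Int :=
  if rectangles = [] then ([], []) else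
  let keep := (pvBoundaryB rectangles).filter
      (fun p => decide (0 < p.1) && (decide (min_edge ≤ p.1) || decide (min_edge ≤ p.2)))
  let sm : List (Int × Int) × Int := match keep with
    | [] => ([], min_edge)
    | p :: k => (p :: pvStepsTail (p :: k), (k.getLastD p).2)
  ([0, min_edge] ++ sm.1.map Prod.fst ++ [0, 0, min_edge, min_edge, 0],
   [0, 0] ++ sm.1.map Prod.snd ++ [sm.2, min_edge, min_edge, 0, 0])

-- ===== PRECONDITION & SPEC =====
def Spec_compute_envelope (rectangles : List (Int × Int)) (min_edge : Int) (out : List Int × List Int) : Prop := out = compute_envelope_alt rectangles min_edge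
instance (rectangles : List (Int × Int)) (min_edge : Int) (out : List Int × List Int) : Decidable (Spec_compute_envelope rectangles min_edge out) := by unfold Spec_compute_envelope; infer_instance

-- ===== CLAIM (what is proved, stated in full; the proofs are below) =====
def Claim_equal_compute_envelope : Prop := ∀ (rectangles : List (Int × Int)) (min_edge : Int), Dom_compute_envelope rectangles min_edge → Spec_compute_envelope rectangles min_edge (compute_envelope rectangles min_edge)

-- ===== LEMMAS AND PROOFS =====

-- B's max_x_at computes the same value as A's
theorem pvMaxXB_eq (rs : List (Int × Int)) (y : Int) : pvMaxXB rs y = pvMaxXA rs y := by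
  unfold pvMaxXB pvMaxXA
  congr 1
  funext m r
  dsimp only
  split_ifs <;> omega

-- max_x_at_y is unchanged from y-1 to y unless y = edge+1 for some edge
theorem pvMaxXA_step (rs : List (Int × Int)) (y : Int)
    (h : ∀ r ∈ rs, y ≠ r.1 + 1 ∧ y ≠ r.2 + 1) :
    pvMaxXA rs y = pvMaxXA rs (y - 1) := by
  unfold pvMaxXA
  suffices H : ∀ (l : List (Int × Int)) (m : Int), (∀ r ∈ l, y ≠ r.1 + 1 ∧ y ≠ r.2 + 1) →
      l.foldl (fun max_x r =>
        let m1 := if y ≤ r.2 then max max_x r.1 else max_x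
        if y ≤ r.1 then max m1 r.2 else m1) m
      = l.foldl (fun max_x r =>
        let m1 := if y - 1 ≤ r.2 then max max_x r.1 else max_x
        if y - 1 ≤ r.1 then max m1 r.2 else m1) m by
    exact H rs 0 h
  intro l
  induction l with
  | nil => intro m _; rfl
  | cons r t ih =>
    intro m hh
    simp only [List.foldl_cons]
    have h1 := hh r (by simp)
    have heq : (let m1 := if y ≤ r.2 then max m r.1 else m
        if y ≤ r.1 then max m1 r.2 else m1)
        = (let m1 := if y - 1 ≤ r.2 then max m r.1 else m
        if y - 1 ≤ r.1 then max m1 r.2 else m1) := by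
      dsimp only; split_ifs <;> omega
    rw [heq]
    exact ih _ (fun r hr => hh r (List.mem_cons_of_mem _ hr))

-- constancy of any g on a gap with no change points
theorem pvConst (g : Int → Int) (a b : Int) (hab : a ≤ b)
    (h : ∀ y, a < y → y ≤ b → g y = g (y - 1)) : g b = g a := by
  obtain ⟨n, hn⟩ : ∃ n : Nat, b = a + n := ⟨(b - a).toNat, by omega⟩
  subst hn
  clear hab
  induction n with
  | zero => simp
  | succ k ih =>
    have hk : g (a + (k : Int)) = g a := ih (fun y h1 h2 => h y h1 (by push_cast; omega))
    have hs := h (a + ((k : Nat) + 1 : Nat)) (by push_cast; omega) (by omega)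
    have e : a + (((k : Nat) + 1 : Nat) : Int) - 1 = a + (k : Int) := by push_cast; ring
    rw [hs, e, hk]

-- membership in B's level set
theorem pvMem_levels (rs : List (Int × Int)) (y : Int) :
    y ∈ pvLevelsB rs ↔ y = 0 ∨ (0 ≤ y ∧ y ≤ 150 ∧ ∃ r ∈ rs, y = r.1 + 1 ∨ y = r.2 + 1) := by
  unfold pvLevelsB
  rw [PySem.Set.mem_ofList]
  have hrm : ∀ r : Int × Int,
      (y ∈ (if 0 ≤ r.1 + 1 ∧ r.1 + 1 ≤ 150 then [r.1 + 1] else ([] : List Int)) ++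
           (if 0 ≤ r.2 + 1 ∧ r.2 + 1 ≤ 150 then [r.2 + 1] else ([] : List Int)))
      ↔ (0 ≤ y ∧ y ≤ 150 ∧ (y = r.1 + 1 ∨ y = r.2 + 1)) := by
    intro r
    rw [List.mem_append]
    split_ifs <;> simp <;> omega
  simp only [List.mem_cons, List.mem_flatMap, hrm]
  constructor
  · rintro (rfl | ⟨r, hr, h1, h2, h3⟩)
    · exact Or.inl rfl
    · exact Or.inr ⟨h1, h2, r, hr, h3⟩
  · rintro (rfl | ⟨h1, h2, r, hr, h3⟩)
    · exact Or.inl rfl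
    · exact Or.inr ⟨r, hr, h1, h2, h3⟩

theorem pvNodup_levels (rs : List (Int × Int)) : (pvLevelsB rs).Nodup := by
  unfold pvLevelsB
  exact PySem.Set.nodup_ofList _

-- change indicator at level y
def pvChg (rs : List (Int × Int)) (y : Int) : Bool :=
  decide (pvMaxXA rs y ≠ pvMaxXA rs (y - 1))

-- the recording fold step of A's sampling loop
def pvStep (rs : List (Int × Int)) (st : List (Int × Int) × Option Int) (y : Int) :
    List (Int × Int) × Option Int :=
  let cx := pvMaxXA rs y
  if some cx ≠ st.2 then (st.1 ++ [(cx, y)], some cx) else st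

-- canonical form of the recorded points from level a on, given prev = max at a-1
theorem pvRec_suffix (rs : List (Int × Int)) : ∀ (n : Nat) (a : Int), a + n = 151 → 0 < a →
    ∀ (acc : List (Int × Int)),
    ((PySem.List.pyRange a 151 1).foldl (pvStep rs) (acc, some (pvMaxXA rs (a - 1)))).1
    = acc ++ ((PySem.List.pyRange a 151 1).filter (pvChg rs)).map (fun y => (pvMaxXA rs y, y)) := by
  intro n
  induction n with
  | zero =>
    intro a ha _ acc
    rw [PySem.List.pyRange_one_eq_nil (by omega)]
    simp
  | succ k ih =>
    intro a ha hpos acc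
    rw [PySem.List.pyRange_one_cons (by omega)]
    simp only [List.foldl_cons, List.filter_cons]
    by_cases hc : pvMaxXA rs a = pvMaxXA rs (a - 1)
    · have hstep : pvStep rs (acc, some (pvMaxXA rs (a - 1))) a = (acc, some (pvMaxXA rs a)) := by
        unfold pvStep; simp [hc]
      have hchg : pvChg rs a = false := by simp [pvChg, hc]
      rw [hstep, hchg]
      have := ih (a + 1) (by omega) (by omega) acc
      simpa using this
    · have hstep : pvStep rs (acc, some (pvMaxXA rs (a - 1))) a
          = (acc ++ [(pvMaxXA rs a, a)], some (pvMaxXA rs a)) := by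
        unfold pvStep; simp [hc]
      have hchg : pvChg rs a = true := by simp [pvChg, hc]
      rw [hstep, hchg]
      have := ih (a + 1) (by omega) (by omega) (acc ++ [(pvMaxXA rs a, a)])
      simp only [show a + 1 - 1 = a by ring] at this
      rw [this]
      simp

-- A's sampling loop in canonical form
theorem pvBoundaryA_canon (rs : List (Int × Int)) :
    pvBoundaryA rs = (pvMaxXA rs 0, 0)
      :: ((PySem.List.pyRange 1 151 1).filter (pvChg rs)).map (fun y => (pvMaxXA rs y, y)) := by
  unfold pvBoundaryA
  rw [PySem.List.pyRange_one_cons (by norm_num)]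
  simp only [List.foldl_cons]
  have h0 : (fun (st : List (Int × Int) × Option Int) y =>
      let cx := pvMaxXA rs y
      if some cx ≠ st.2 then (st.1 ++ [(cx, y)], some cx) else st) = pvStep rs := by
    funext st y; rfl
  rw [h0]
  have hred : (if some (pvMaxXA rs 0) ≠ none
        then (([] ++ [(pvMaxXA rs 0, 0)], some (pvMaxXA rs 0)) : List (Int × Int) × Option Int)
        else ([], none)) = ([(pvMaxXA rs 0, 0)], some (pvMaxXA rs 0)) := by simp
  rw [hred]
  have := pvRec_suffix rs 150 1 (by norm_num) (by norm_num) [(pvMaxXA rs 0, 0)]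
  simp only [show (1 : Int) - 1 = 0 by ring] at this
  norm_num at this ⊢
  rw [this]

-- the pvStep fold over a strictly sorted set of change-level candidates, general form
theorem pvRecB_general (rs : List (Int × Int)) : ∀ (L : List Int) (e : Int) (acc : List (Int × Int)),
    0 ≤ e → e ≤ 150 → L.Pairwise (· < ·) → (∀ y ∈ L, e < y ∧ y ≤ 150) →
    (∀ y, e < y → y ≤ 150 → pvChg rs y = true → y ∈ L) →
    (L.foldl (pvStep rs) (acc, some (pvMaxXA rs e))).1
    = acc ++ ((PySem.List.pyRange (e + 1) 151 1).filter (pvChg rs)).map (fun y => (pvMaxXA rs y, y)) := by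
  intro L
  induction L with
  | nil =>
    intro e acc he0 he1 _ _ hcl
    simp only [List.foldl_nil]
    have : (PySem.List.pyRange (e + 1) 151 1).filter (pvChg rs) = [] := by
      rw [List.filter_eq_nil_iff]
      intro y hy
      rw [PySem.List.mem_pyRange_one] at hy
      intro hcy
      exact absurd (hcl y (by omega) (by omega) hcy) (List.not_mem_nil)
    rw [this]; simp
  | cons l t ih =>
    intro e acc he0 he1 hpw hmem hcl
    have hl := hmem l (List.mem_cons_self)
    have htgt : ∀ y ∈ t, l < y := (List.pairwise_cons.mp hpw).1
    have hconst : pvMaxXA rs (l - 1) = pvMaxXA rs e := by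
      apply pvConst (pvMaxXA rs) e (l - 1) (by omega)
      intro y hy1 hy2
      by_cases hy : pvMaxXA rs y = pvMaxXA rs (y - 1)
      · exact hy
      · have hyc : pvChg rs y = true := by simp [pvChg, hy]
        have := hcl y hy1 (by omega) hyc
        rcases List.mem_cons.mp this with rfl | hmt
        · omega
        · exact absurd (htgt y hmt) (by omega)
    have hnochg : ∀ y, e < y → y < l → pvChg rs y = false := by
      intro y hy1 hy2
      by_cases hy : pvMaxXA rs y = pvMaxXA rs (y - 1)
      · simp [pvChg, hy]
      · have hyc : pvChg rs y = true := by simp [pvChg, hy]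
        have := hcl y hy1 (by omega) hyc
        rcases List.mem_cons.mp this with rfl | hmt
        · omega
        · exact absurd (htgt y hmt) (by omega)
    have hsplit : PySem.List.pyRange (e + 1) 151 1
        = PySem.List.pyRange (e + 1) l 1 ++ (l :: PySem.List.pyRange (l + 1) 151 1) := by
      rw [PySem.List.pyRange_one_append (e + 1) l 151 (by omega) (by omega)]
      congr 1
      exact PySem.List.pyRange_one_cons (by omega)
    have hfilt1 : (PySem.List.pyRange (e + 1) l 1).filter (pvChg rs) = [] := by
      rw [List.filter_eq_nil_iff]
      intro y hy
      rw [PySem.List.mem_pyRange_one] at hy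
      simp [hnochg y (by omega) (by omega)]
    rw [hsplit, List.filter_append, hfilt1, List.nil_append, List.filter_cons]
    simp only [List.foldl_cons]
    have hih := fun acc' => ih l acc' (by omega) (by omega) (List.pairwise_cons.mp hpw).2
      (fun y hy => ⟨htgt y hy, (hmem y (List.mem_cons_of_mem _ hy)).2⟩)
      (fun y hy1 hy2 hyc => by
        rcases List.mem_cons.mp (hcl y (by omega) hy2 hyc) with rfl | hmt
        · omega
        · exact hmt)
    by_cases hc : pvMaxXA rs l = pvMaxXA rs (l - 1)
    · have hstep : pvStep rs (acc, some (pvMaxXA rs e)) l = (acc, some (pvMaxXA rs l)) := by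
        unfold pvStep; rw [hconst] at hc; simp [hc]
      have hchg : pvChg rs l = false := by simp [pvChg, hc]
      rw [hstep, hchg, hih acc]
      simp
    · have hstep : pvStep rs (acc, some (pvMaxXA rs e)) l
          = (acc ++ [(pvMaxXA rs l, l)], some (pvMaxXA rs l)) := by
        unfold pvStep; rw [hconst] at hc; simp [hc]
      have hchg : pvChg rs l = true := by simp [pvChg, hc]
      rw [hstep, hchg, hih (acc ++ [(pvMaxXA rs l, l)])]
      simp

-- the pvStep fold over B's sorted levels equals A's boundary list
theorem pvFoldLevels_eq (rs : List (Int × Int)) :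
    ((PySem.List.sorted (pvLevelsB rs) (fun x => x) false).foldl (pvStep rs) ([], none)).1
    = pvBoundaryA rs := by
  have hmemE : ∀ y : Int, y ∈ PySem.List.sorted (pvLevelsB rs) (fun x => x) false ↔ y ∈ pvLevelsB rs :=
    fun y => PySem.List.mem_sorted _ _ _ _
  have h0E : (0 : Int) ∈ PySem.List.sorted (pvLevelsB rs) (fun x => x) false :=
    (hmemE 0).mpr ((pvMem_levels rs 0).mpr (Or.inl rfl))
  have hrange : ∀ y ∈ PySem.List.sorted (pvLevelsB rs) (fun x => x) false, 0 ≤ y ∧ y ≤ 150 := by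
    intro y hy
    rcases (pvMem_levels rs y).mp ((hmemE y).mp hy) with rfl | ⟨h1, h2, _⟩
    · omega
    · exact ⟨h1, h2⟩
  have hnodupE : (PySem.List.sorted (pvLevelsB rs) (fun x => x) false).Nodup :=
    (PySem.List.sorted_perm _ _ _).nodup_iff.mpr (pvNodup_levels rs)
  have hle : (PySem.List.sorted (pvLevelsB rs) (fun x => x) false).Pairwise (fun a b => a ≤ b) :=
    PySem.List.sorted_pairwise _ _
  have hstrict : (PySem.List.sorted (pvLevelsB rs) (fun x => x) false).Pairwise (· < ·) := by
    refine (hle.and hnodupE).imp ?_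
    rintro a b ⟨h1, h2⟩
    exact lt_of_le_of_ne h1 h2
  obtain ⟨h, t, hht⟩ : ∃ h t, PySem.List.sorted (pvLevelsB rs) (fun x => x) false = h :: t := by
    cases hEc : PySem.List.sorted (pvLevelsB rs) (fun x => x) false with
    | nil => rw [hEc] at h0E; exact absurd h0E (List.not_mem_nil)
    | cons h t => exact ⟨h, t, rfl⟩
  rw [hht] at hmemE h0E hrange hnodupE hstrict ⊢
  have hh0 : h = 0 := by
    rcases List.mem_cons.mp h0E with h' | hmt
    · omega
    · have h1 := (List.pairwise_cons.mp hstrict).1 0 hmt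
      have h2 := hrange h List.mem_cons_self
      omega
  subst hh0
  simp only [List.foldl_cons]
  have hred : pvStep rs (([], none) : List (Int × Int) × Option Int) 0
      = ([(pvMaxXA rs 0, 0)], some (pvMaxXA rs 0)) := by
    unfold pvStep; simp
  rw [hred]
  have htail := pvRecB_general rs t 0 [(pvMaxXA rs 0, 0)] (by norm_num) (by norm_num)
    (List.pairwise_cons.mp hstrict).2
    (fun y hy => ⟨(List.pairwise_cons.mp hstrict).1 y hy,
      (hrange y (List.mem_cons_of_mem _ hy)).2⟩)
    (by
      intro y hy1 hy2 hyc
      have hev : ∃ r ∈ rs, y = r.1 + 1 ∨ y = r.2 + 1 := by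
        by_contra hno
        push Not at hno
        have := pvMaxXA_step rs y (fun r hr => ⟨(hno r hr).1, (hno r hr).2⟩)
        simp [pvChg, this] at hyc
      have hmem : y ∈ (0 : Int) :: t :=
        (hmemE y).mpr ((pvMem_levels rs y).mpr (Or.inr ⟨by omega, hy2, hev⟩))
      rcases List.mem_cons.mp hmem with rfl | hmt
      · omega
      · exact hmt)
  norm_num at htail
  rw [htail, pvBoundaryA_canon]

-- zip-with-predecessor dedup, tail invariant: prev always equals the previous sample's x
theorem pvDedup_tail : ∀ (t : List (Int × Int)) (h : Int × Int) (acc : List (Int × Int)),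
    t.foldl (fun (st : List (Int × Int) × Option Int) p =>
        if some p.1 ≠ st.2 then (st.1 ++ [p], some p.1) else st) (acc, some h.1)
    = (acc ++ (((h :: t).zip t).filter (fun q => decide (q.2.1 ≠ q.1.1))).map Prod.snd,
        some ((t.getLastD h).1)) := by
  intro t
  induction t with
  | nil => intro h acc; simp
  | cons q u ih =>
    intro h acc
    simp only [List.foldl_cons, List.zip_cons_cons, List.filter_cons]
    by_cases hq : q.1 = h.1
    · have hcond : ¬ (some q.1 ≠ some h.1) := by simp [hq]
      rw [if_neg hcond]
      have hd : (decide ((h, q).2.1 ≠ (h, q).1.1)) = false := by simp [hq]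
      rw [hd]
      have := ih q acc
      rw [hq] at this
      rw [this, List.getLastD_cons]
      simp
    · have hcond : (some q.1 ≠ some h.1) := by simp [hq]
      rw [if_pos hcond]
      have hd : (decide ((h, q).2.1 ≠ (h, q).1.1)) = true := by simp [hq]
      rw [hd]
      rw [ih q (acc ++ [q]), List.getLastD_cons]
      simp

-- consecutive-pair dedup equals the prev-tracking fold
theorem pvDedupC_eq (s : List (Int × Int)) :
    (match s with
      | [] => []
      | h :: t => h :: ((s.zip t).filter (fun q => decide (q.2.1 ≠ q.1.1))).map Prod.snd)
    = (s.foldl (fun (st : List (Int × Int) × Option Int) p =>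
        if some p.1 ≠ st.2 then (st.1 ++ [p], some p.1) else st) ([], none)).1 := by
  cases s with
  | nil => rfl
  | cons h t =>
    simp only [List.foldl_cons]
    rw [if_pos (by simp)]
    rw [pvDedup_tail t h ([] ++ [h])]
    simp

-- B's boundary list equals A's
theorem pvBoundaryB_eq (rs : List (Int × Int)) : pvBoundaryB rs = pvBoundaryA rs := by
  unfold pvBoundaryB
  rw [pvDedupC_eq (pvSamplesB rs)]
  unfold pvSamplesB
  rw [List.foldl_map]
  have hfun : (fun (st : List (Int × Int) × Option Int) (y : Int) =>
      if some (pvMaxXB rs y, y).1 ≠ st.2 then (st.1 ++ [(pvMaxXB rs y, y)], some (pvMaxXB rs y, y).1) else st)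
      = pvStep rs := by
    funext st y
    simp only [pvMaxXB_eq, pvStep]
  rw [hfun, pvFoldLevels_eq]

-- unconditional polygon step of A (the kept-point branch)
def pvEnvA (st : (List Int × List Int) × Int) (p : Int × Int) : (List Int × List Int) × Int :=
  let st1 := if 2 < st.1.1.length then ((st.1.1 ++ [p.1], st.1.2 ++ [st.2]), st.2) else st
  ((st1.1.1 ++ [p.1], st1.1.2 ++ [p.2]), p.2)

-- A's polygon fold, once started, equals the zipped step pairs of B
theorem pvPoly : ∀ (k : List (Int × Int)) (p : Int × Int) (xs ys : List Int), 2 < xs.length →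
    k.foldl pvEnvA ((xs, ys), p.2)
    = ((xs ++ (pvStepsTail (p :: k)).map Prod.fst, ys ++ (pvStepsTail (p :: k)).map Prod.snd),
        (k.getLastD p).2) := by
  intro k
  induction k with
  | nil => intro p xs ys _; simp [pvStepsTail]
  | cons q u ih =>
    intro p xs ys hlen
    simp only [List.foldl_cons]
    have ha : pvEnvA ((xs, ys), p.2) q = ((xs ++ [q.1] ++ [q.1], ys ++ [p.2] ++ [q.2]), q.2) := by
      unfold pvEnvA; simp [if_pos hlen]
    rw [ha, ih q _ _ (by simp; omega)]
    have hst : pvStepsTail (p :: q :: u) = (q.1, p.2) :: q :: pvStepsTail (q :: u) := by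
      unfold pvStepsTail
      simp
    rw [hst, List.getLastD_cons]
    simp

-- the last recorded y always equals A's running prev_y
theorem pvLastA : ∀ (l : List (Int × Int)) (xs ys : List Int) (py : Int), ys.getLastD 0 = py →
    ((l.foldl pvEnvA ((xs, ys), py)).1.2).getLastD 0 = (l.foldl pvEnvA ((xs, ys), py)).2 := by
  intro l
  induction l with
  | nil => intro xs ys py h; exact h
  | cons p k ih =>
    intro xs ys py h
    simp only [List.foldl_cons]
    unfold pvEnvA
    split_ifs with hlen <;>
      exact ih _ _ _ (by simp)

-- ===== VERDICT (by name: the statement is the Claim_ definition above) =====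
theorem compute_envelope_spec : Claim_equal_compute_envelope := by
  intro rs me _
  unfold Spec_compute_envelope compute_envelope compute_envelope_alt
  by_cases hrs : rs = []
  · simp [hrs]
  · simp only [if_neg hrs]
    rw [pvBoundaryB_eq]
    -- A's conditional fold = unconditional fold over the filtered list
    have hcond : (fun (st : (List Int × List Int) × Int) (p : Int × Int) =>
        if 0 < p.1 ∧ (me ≤ p.1 ∨ me ≤ p.2) then
          let st1 : (List Int × List Int) × Int :=
            if 2 < st.1.1.length then ((st.1.1 ++ [p.1], st.1.2 ++ [st.2]), st.2) else st
          ((st1.1.1 ++ [p.1], st1.1.2 ++ [p.2]), p.2)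
        else st)
        = (fun st p => if (decide (0 < p.1) && (decide (me ≤ p.1) || decide (me ≤ p.2))) = true
            then pvEnvA st p else st) := by
      funext st p
      by_cases hp : 0 < p.1 ∧ (me ≤ p.1 ∨ me ≤ p.2)
      · have hd : (decide (0 < p.1) && (decide (me ≤ p.1) || decide (me ≤ p.2))) = true := by
          simp only [Bool.and_eq_true, Bool.or_eq_true, decide_eq_true_eq]
          exact ⟨hp.1, hp.2⟩
        rw [if_pos hp, hd, if_pos rfl]
        rfl
      · have hd : ¬((decide (0 < p.1) && (decide (me ≤ p.1) || decide (me ≤ p.2))) = true) := by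
          simp only [Bool.and_eq_true, Bool.or_eq_true, decide_eq_true_eq]
          exact hp
        rw [if_neg hp, if_neg hd]
    rw [hcond, ← List.foldl_filter]
    cases hk : (pvBoundaryA rs).filter
        (fun p => decide (0 < p.1) && (decide (me ≤ p.1) || decide (me ≤ p.2))) with
    | nil =>
      norm_num
    | cons p k =>
      simp only [List.foldl_cons]
      have ha : pvEnvA (([0, me], [0, 0]), 0) p = (([0, me, p.1], [0, 0, p.2]), p.2) := by
        unfold pvEnvA; norm_num
      have hP := pvPoly k p [0, me, p.1] [0, 0, p.2] (by norm_num)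
      have hlast := pvLastA k [0, me, p.1] [0, 0, p.2] p.2 (by simp)
      rw [hP] at hlast
      rw [ha, hP]
      rw [if_pos (by simp only [List.length_append, List.length_cons, List.length_nil]; omega)]
      rw [hlast]
      simp
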